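-- pv_equiv track=rewrite | github.com/ChanceCarmichael/Information-Retrieval-System | src/spelling.py | split_into_bigrams
-- ===== SOURCE A (Python) =====
-- def split_into_bigrams( word ):
--     word_list = [char for char in word]
--     ret_list = []
--     place = 0
--     for letter in word_list:
--
--         if place == 0:
--             place = place + 1
--             continue
--
--         if word_list[place] == " ":
--             break
--         ret_list.append(word_list[place-1] + word_list[place])
--         place = place + 1
--     return ret_list
-- ===== SOURCE B (Python) =====
-- def split_into_bigrams(word):
--     chars = [c for c in word]
--     cut = next((i for i in range(1, len(chars)) if chars[i] == " "), len(chars))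
--     prefix = chars[:cut]
--     return [a + b for a, b in zip(prefix, prefix[1:])]
-- ===== Notes on version B (the rewrite author's own statement) =====
-- stated objective: idiomatic
-- what changed: Replaces the index-counter loop with break by a declarative pipeline: find the cut position (first space at index >= 1) with next() over a generator, slice the prefix, and emit bigrams with a pairwise zip comprehension.
import Mathlib
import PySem

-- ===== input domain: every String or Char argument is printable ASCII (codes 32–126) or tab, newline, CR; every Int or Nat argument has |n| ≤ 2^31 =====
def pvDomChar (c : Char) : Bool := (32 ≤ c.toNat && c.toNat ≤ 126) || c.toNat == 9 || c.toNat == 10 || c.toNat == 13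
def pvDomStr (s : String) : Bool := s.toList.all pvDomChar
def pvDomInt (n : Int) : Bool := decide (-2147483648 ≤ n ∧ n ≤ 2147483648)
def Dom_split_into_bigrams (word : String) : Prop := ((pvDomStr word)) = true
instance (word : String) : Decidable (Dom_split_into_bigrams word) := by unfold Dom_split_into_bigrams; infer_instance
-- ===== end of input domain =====

-- B replaces A's index-counter loop with break by find-the-cut + slice + pairwise-zip comprehension (idiomatic; same cost).

-- ===== PORT A =====
-- the for-loop of A: one step per letter of word_list, carrying place and ret_list
def splitLoopA (wl : List Char) : List Char → Int → List String → List String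
  | [], _, ret => ret
  | _ :: rest, place, ret =>
    if place = 0 then splitLoopA wl rest (place + 1) ret
    else
      match PySem.List.pyGet? wl place with
      | none => ret        -- unreachable: place stays in range while letters remain
      | some c =>
        if c = ' ' then ret       -- break
        else
          match PySem.List.pyGet? wl (place - 1) with
          | none => ret    -- unreachable
          | some p => splitLoopA wl rest (place + 1) (ret ++ [String.mk [p, c]])

def split_into_bigrams (word : String) : List String :=
  let word_list := word.toList
  splitLoopA word_list word_list 0 []

-- ===== PORT B =====
def split_into_bigrams_alt (word : String) : List String :=
  let chars := word.toList
  let cut : Int :=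
    match (PySem.List.pyRange 1 chars.length 1).find?
            (fun i => PySem.List.pyGet? chars i == some ' ') with
    | some i => i
    | none => (chars.length : Int)
  let pre := PySem.List.slice chars none (some cut)
  (pre.zip pre.tail).map (fun p => String.mk [p.1, p.2])

-- ===== PRECONDITION & SPEC =====
def Spec_split_into_bigrams (word : String) (out : List String) : Prop := out = split_into_bigrams_alt word
instance (word : String) (out : List String) : Decidable (Spec_split_into_bigrams word out) := by unfold Spec_split_into_bigrams; infer_instance

-- ===== CLAIM (what is proved, stated in full; the proofs are below) =====
def Claim_equal_split_into_bigrams : Prop := ∀ (word : String), Dom_split_into_bigrams word → Spec_split_into_bigrams word (split_into_bigrams word)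

-- ===== LEMMAS AND PROOFS =====

-- bridge: bigrams of prev·l up to (excluding) the first space in l
def bg : Char → List Char → List String
  | _, [] => []
  | prev, c :: rest => if c = ' ' then [] else String.mk [prev, c] :: bg c rest

-- all adjacent bigrams of prev·l (no stopping)
def pairsAll : Char → List Char → List String
  | _, [] => []
  | prev, c :: rest => String.mk [prev, c] :: pairsAll c rest

lemma bg_eq_pairsAll_takeWhile (prev : Char) (l : List Char) :
    bg prev l = pairsAll prev (l.takeWhile (fun c => !(c = ' '))) := by
  induction l generalizing prev with
  | nil => rfl
  | cons c rest ih =>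
    by_cases hc : c = ' ' <;> simp [bg, List.takeWhile, hc, pairsAll, ih]

lemma zip_pairs_eq_pairsAll (prev : Char) (l : List Char) :
    (((prev :: l).zip l).map (fun p => String.mk [p.1, p.2])) = pairsAll prev l := by
  induction l generalizing prev with
  | nil => rfl
  | cons c rest ih => simp [pairsAll, ← ih]

-- A's loop, once past the first iteration, computes ret ++ bg prev rest
lemma splitLoopA_eq (rest : List Char) : ∀ (pre : List Char) (prev : Char) (ret : List String),
    splitLoopA (pre ++ prev :: rest) rest ((pre.length : Int) + 1) ret = ret ++ bg prev rest := by
  induction rest with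
  | nil => intro pre prev ret; simp [splitLoopA, bg]
  | cons c rest' ih =>
    intro pre prev ret
    have hlen : ((pre.length : Int) + 1) = (((pre ++ [prev]).length : Nat) : Int) := by
      simp only [List.length_append, List.length_cons, List.length_nil]; push_cast; ring
    have hget : PySem.List.pyGet? (pre ++ prev :: c :: rest') ((pre.length : Int) + 1)
        = some c := by
      rw [hlen]
      have : pre ++ prev :: c :: rest' = (pre ++ [prev]) ++ c :: rest' := by simp
      rw [this, PySem.List.pyGet?_append_length]
    have hget' : PySem.List.pyGet? (pre ++ prev :: c :: rest') (((pre.length : Int) + 1) - 1)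
        = some prev := by
      have : ((pre.length : Int) + 1) - 1 = ((pre.length : Nat) : Int) := by ring
      rw [this, PySem.List.pyGet?_append_length]
    have hne : ((pre.length : Int) + 1) ≠ 0 := by omega
    by_cases hc : c = ' '
    · subst hc
      simp [splitLoopA, hne, hget, bg]
    · have ih' := ih (pre ++ [prev]) c (ret ++ [String.mk [prev, c]])
      simp only [List.append_assoc, List.cons_append, List.nil_append] at ih'
      simp only [splitLoopA, if_neg hne, hget, hget', hc]
      rw [hlen, ih']
      simp [bg, hc]

-- A on a raw char list equals the bridge
lemma portA_eq_bg (wl : List Char) :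
    splitLoopA wl wl 0 [] = match wl with | [] => [] | c :: cs => bg c cs := by
  cases wl with
  | nil => rfl
  | cons c cs =>
    have h := splitLoopA_eq cs [] c []
    simpa [splitLoopA] using h

-- the cut search equals 1 + length of the space-free prefix of cs
lemma find_cut_eq (cs : List Char) : ∀ (pre : List Char), pre ≠ [] →
    (match (PySem.List.pyRange (pre.length : Int) ((pre.length : Int) + (cs.length : Int)) 1).find?
            (fun i => PySem.List.pyGet? (pre ++ cs) i == some ' ') with
      | some i => i
      | none => (pre.length : Int) + (cs.length : Int))
    = (pre.length : Int) + ((cs.takeWhile (fun c => !(c = ' '))).length : Int) := by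
  induction cs with
  | nil =>
    intro pre _
    simp
  | cons c rest ih =>
    intro pre hpre
    have hlt : (pre.length : Int) < (pre.length : Int) + ((c :: rest).length : Int) := by
      simp only [List.length_cons]; push_cast; omega
    rw [PySem.List.pyRange_one_cons hlt]
    have hget : PySem.List.pyGet? (pre ++ c :: rest) ((pre.length : Nat) : Int) = some c :=
      PySem.List.pyGet?_append_length pre rest c
    by_cases hc : c = ' '
    · simp [List.find?, hc, List.takeWhile]
    · have ih' := ih (pre ++ [c]) (by simp)
      simp only [List.length_append, List.length_cons, List.length_nil,
        List.append_assoc, List.cons_append, List.nil_append] at ih'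
      push_cast at ih' ⊢
      have hfalse : (some c == some ' ') = false := by simp [hc]
      simp only [List.find?, hget, hfalse, List.takeWhile, hc, decide_false, Bool.not_false,
        List.length_cons]
      have harg : ((pre.length : Int) + 1) + ((rest.length : Int) + 1 - 1)
          = (pre.length : Int) + ((rest.length : Int) + 1) := by ring
      push_cast
      rw [show ((pre.length : Int) + ((rest.length : Int) + 1)) = ((pre.length : Int) + 1) + (rest.length : Int) from by ring,
          ih']
      ring

-- B on a raw char list equals the bridge
lemma portB_eq_bg (word : String) :
    split_into_bigrams_alt word
    = (match word.toList with | [] => [] | c :: cs => bg c cs) := by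
  unfold split_into_bigrams_alt
  cases hw : word.toList with
  | nil =>
    simp [PySem.List.slice]
  | cons c cs =>
    have h := find_cut_eq cs [c] (by simp)
    simp only [List.length_cons, List.length_nil, Nat.zero_add, Nat.cast_one,
      List.cons_append, List.nil_append] at h
    have hlen : ((c :: cs).length : Int) = 1 + (cs.length : Int) := by
      simp only [List.length_cons]; push_cast; ring
    simp only [hlen]
    rw [h]
    set tw := cs.takeWhile (fun c => !(c = ' ')) with htw
    have htwpre : tw <+: cs := List.takeWhile_prefix _
    have hcut : (1 : Int) + (tw.length : Int) = (((1 + tw.length : Nat)) : Int) := by push_cast; ring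
    rw [hcut, PySem.List.slice_to_natCast]
    have htake : (c :: cs).take (1 + tw.length) = c :: tw := by
      simp only [List.take_succ_cons, Nat.add_comm 1 tw.length]
      have := (List.prefix_iff_eq_take).1 htwpre
      simp [← this]
    rw [htake]
    have : (c :: tw).tail = tw := rfl
    rw [this, zip_pairs_eq_pairsAll, bg_eq_pairsAll_takeWhile]

-- ===== VERDICT (by name: the statement is the Claim_ definition above) =====
theorem split_into_bigrams_spec : Claim_equal_split_into_bigrams := by
  intro word _
  unfold Spec_split_into_bigrams
  rw [portB_eq_bg]
  unfold split_into_bigrams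
  exact portA_eq_bg word.toList
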